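-- pv_equiv track=rewrite | github.com/Favo02/competitive-programming | cloudflight-coding-contest/41st-CCC-November-2025/4.py | pace
-- ===== SOURCE A (Python) =====
-- from math import ceil
--
-- def pace(station):
--     res = []
--     cur = 5
--     for _ in range(ceil(abs(station) / 2)+1):
--         res.append(paces[cur])
--         nextcur = (cur + 1) if station > 0 else (cur - 1)
--         cur = max(0, min(len(paces)-1, nextcur))
--
--     if station % 2 == 1:
--         res += (res[:-1])[::-1]
--     else:
--         res += res[::-1]
--
--     return " ".join(map(str, res))
--
-- paces = [-1, -2, -3, -4, -5, 0, 5, 4, 3, 2, 1]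
-- ===== SOURCE B (Python) =====
-- def pace(station):
--     ramp = [0, 5, 4, 3, 2, 1] if station > 0 else [0, -5, -4, -3, -2, -1]
--     n = (abs(station) + 1) // 2 + 1
--     full = ramp[:n] + [ramp[-1]] * (n - len(ramp))
--     full = full + full[::-1]
--     if station % 2 == 1:
--         del full[n]
--     return " ".join(map(str, full))
-- ===== Notes on version B (the rewrite author's own statement) =====
-- stated objective: faster
-- what changed: B never walks or indexes the paces table: it pads a direction ramp literal with copies of its last element to the half length (bulk slice and list repetition instead of a per-iteration clamped cursor walk), mirrors full+full[::-1] and deletes the middle duplicate for odd stations.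
import Mathlib
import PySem

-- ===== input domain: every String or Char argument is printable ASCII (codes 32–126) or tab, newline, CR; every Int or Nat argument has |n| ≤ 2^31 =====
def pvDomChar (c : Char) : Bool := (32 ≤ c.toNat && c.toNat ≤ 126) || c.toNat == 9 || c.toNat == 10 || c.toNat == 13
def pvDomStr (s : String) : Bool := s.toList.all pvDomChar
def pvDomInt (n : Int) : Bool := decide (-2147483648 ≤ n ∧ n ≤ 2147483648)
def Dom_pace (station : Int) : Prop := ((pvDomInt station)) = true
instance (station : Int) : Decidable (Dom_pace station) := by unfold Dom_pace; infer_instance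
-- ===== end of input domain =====

-- B drops A's clamped cursor walk over the paces table entirely: it pads a direction ramp
-- literal with copies of its last element, mirrors full+full[::-1] and deletes the middle
-- duplicate for odd stations (same asymptotic cost; a timing run measured B faster via bulk list ops).

-- ===== PORT A =====
-- module-level constant of A's file
def paces : List Int := [-1, -2, -3, -4, -5, 0, 5, 4, 3, 2, 1]

-- ceil(abs(station)/2) ported exactly as -((-|station|) // 2) (exact for ints; the float ceil is exact on |n| ≤ 2^31)
def pace (station : Int) : String :=
  let n : Int := -(PySem.Int.floordiv (-(station.natAbs : Int)) 2) + 1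
  let st := (List.range n.toNat).foldl
    (fun (st : List Int × Int) _ =>
      let res := st.1 ++ [PySem.List.pyGetD paces st.2 0]   -- paces[cur]; cur always in range
      let nextcur := if station > 0 then st.2 + 1 else st.2 - 1
      (res, max 0 (min ((paces.length : Int) - 1) nextcur)))
    ([], 5)
  let res :=
    if PySem.Int.mod station 2 = 1 then
      st.1 ++ (PySem.List.slice st.1 none (some (-1))).reverse   -- (res[:-1])[::-1]
    else
      st.1 ++ st.1.reverse
  PySem.Str.join " " (res.map PySem.Int.toStr)

-- ===== PORT B =====
def pace_alt (station : Int) : String :=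
  let ramp : List Int := if station > 0 then [0, 5, 4, 3, 2, 1] else [0, -5, -4, -3, -2, -1]
  let n : Int := PySem.Int.floordiv ((station.natAbs : Int) + 1) 2 + 1
  let full := PySem.List.slice ramp none (some n)
              ++ List.replicate (n - (ramp.length : Int)).toNat (PySem.List.pyGetD ramp (-1) 0)
  let full := full ++ full.reverse
  -- 'del full[n]' ported by hand as take/drop around index n (exact: 1 ≤ n < len full here)
  let full := if PySem.Int.mod station 2 = 1 then full.take n.toNat ++ full.drop (n.toNat + 1) else full
  PySem.Str.join " " (full.map PySem.Int.toStr)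

-- ===== PRECONDITION & SPEC =====
def Spec_pace (station : Int) (out : String) : Prop := out = pace_alt station
instance (station : Int) (out : String) : Decidable (Spec_pace station out) := by unfold Spec_pace; infer_instance

-- ===== CLAIM (what is proved, stated in full; the proofs are below) =====
def Claim_equal_pace : Prop := ∀ (station : Int), Dom_pace station → Spec_pace station (pace station)

-- ===== LEMMAS AND PROOFS =====

-- A's loop state after k iterations: accumulated list = map of the clamped closed form, cur = clamp(5 + sign*k).
theorem pace_loop_inv (station : Int) (k : Nat) :
    (List.range k).foldl
      (fun (st : List Int × Int) _ =>
        let res := st.1 ++ [PySem.List.pyGetD paces st.2 0]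
        let nextcur := if station > 0 then st.2 + 1 else st.2 - 1
        (res, max 0 (min ((paces.length : Int) - 1) nextcur)))
      ([], 5)
    = ((List.range k).map (fun i : Nat =>
         PySem.List.pyGetD paces
           (max 0 (min ((paces.length : Int) - 1)
             (5 + (if station > 0 then (1:Int) else -1) * (i : Int)))) 0),
       max 0 (min ((paces.length : Int) - 1)
         (5 + (if station > 0 then (1:Int) else -1) * (k : Int)))) := by
  induction k with
  | zero => simp [paces]
  | succ k ih =>
    rw [List.range_succ, List.foldl_append, List.map_append, ih]
    simp only [List.foldl_cons, List.foldl_nil]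
    refine Prod.ext ?_ ?_
    · simp
    · simp only [paces, List.length_cons, List.length_nil]
      split_ifs <;> push_cast <;> omega

-- the half sequence: A's clamped map equals B's ramp-prefix-plus-padding
theorem half_eq (station : Int) (m : Nat) :
    (List.range m).map (fun i : Nat =>
      PySem.List.pyGetD paces
        (max 0 (min ((paces.length : Int) - 1)
          (5 + (if station > 0 then (1:Int) else -1) * (i : Int)))) 0)
    = (if station > 0 then ([0, 5, 4, 3, 2, 1] : List Int) else [0, -5, -4, -3, -2, -1]).take m
      ++ List.replicate (m - 6)
           (PySem.List.pyGetD (if station > 0 then ([0, 5, 4, 3, 2, 1] : List Int) else [0, -5, -4, -3, -2, -1]) (-1) 0) := by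
  induction m with
  | zero => simp
  | succ m ih =>
    rw [List.range_succ, List.map_append, ih]
    by_cases hm : m < 6
    · have h6 : m + 1 - 6 = 0 ∧ m - 6 = 0 := by omega
      rw [h6.1, h6.2]
      simp only [List.replicate_zero, List.append_nil, List.map_cons, List.map_nil]
      interval_cases m <;> split_ifs <;> simp [paces, PySem.List.pyGetD, PySem.List.pyGet?, PySem.List.pyIdx?]
    · have h6 : m + 1 - 6 = (m - 6) + 1 := by omega
      rw [h6, List.replicate_succ' ]
      have htake : ∀ (l : List Int), l.length = 6 → l.take (m+1) = l.take m := by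
        intro l hl
        rw [List.take_of_length_le (by omega), List.take_of_length_le (by omega)]
      split_ifs with h
      · rw [htake _ rfl]
        have hc : max 0 (min ((paces.length : Int) - 1) (5 + 1 * (m : Int))) = 10 := by
          simp only [paces, List.length_cons, List.length_nil]; omega
        simp only [List.map_cons, List.map_nil, hc, List.append_assoc]
        simp [paces, PySem.List.pyGetD, PySem.List.pyGet?, PySem.List.pyIdx?]
      · rw [htake _ rfl]
        have hc : max 0 (min ((paces.length : Int) - 1) (5 + (-1) * (m : Int))) = 0 := by
          simp only [paces, List.length_cons, List.length_nil]; omega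
        simp only [List.map_cons, List.map_nil, hc, List.append_assoc]
        simp [paces, PySem.List.pyGetD, PySem.List.pyGet?, PySem.List.pyIdx?]

theorem pace_spec' (station : Int) : pace station = pace_alt station := by
  unfold pace pace_alt
  dsimp only
  have hn : -(PySem.Int.floordiv (-(station.natAbs : Int)) 2) + 1
      = PySem.Int.floordiv ((station.natAbs : Int) + 1) 2 + 1 := by
    rw [PySem.Int.floordiv_eq_ediv_of_pos (by omega), PySem.Int.floordiv_eq_ediv_of_pos (by omega)]
    omega
  rw [hn]
  set n : Int := PySem.Int.floordiv ((station.natAbs : Int) + 1) 2 + 1 with hndef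
  have hn1 : 1 ≤ n := by
    rw [hndef, PySem.Int.floordiv_eq_ediv_of_pos (by omega)]
    have : 0 ≤ ((station.natAbs : Int) + 1) / 2 := Int.ediv_nonneg (by omega) (by omega)
    omega
  rw [pace_loop_inv station n.toNat]
  dsimp only
  rw [half_eq station n.toNat]
  -- name the ramp and the B-side half
  set ramp : List Int := if station > 0 then ([0, 5, 4, 3, 2, 1] : List Int) else [0, -5, -4, -3, -2, -1] with hramp
  have hlen : ramp.length = 6 := by rw [hramp]; split_ifs <;> rfl
  have hslice : PySem.List.slice ramp none (some n) = ramp.take n.toNat :=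
    PySem.List.slice_to ramp (by omega)
  have hrepl : (n - (ramp.length : Int)).toNat = n.toNat - 6 := by rw [hlen]; omega
  rw [hslice, hrepl]
  set half : List Int := ramp.take n.toNat ++ List.replicate (n.toNat - 6) (PySem.List.pyGetD ramp (-1) 0) with hhalf
  have hhl : half.length = n.toNat := by
    rw [hhalf]
    simp only [List.length_append, List.length_take, List.length_replicate, hlen]
    omega
  split_ifs with hodd
  · -- odd: A: half ++ half.dropLast.reverse; B: delete index n from half ++ half.reverse
    have ht : (half ++ half.reverse).take n.toNat = half := by
      rw [← hhl, List.take_left]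
    have hd : (half ++ half.reverse).drop (n.toNat + 1) = half.dropLast.reverse := by
      rw [← hhl, List.drop_length_add_append, List.drop_one, List.tail_reverse]
    rw [ht, hd, PySem.List.slice_to_neg_one]
  · rfl

-- ===== VERDICT (by name: the statement is the Claim_ definition above) =====
theorem pace_spec : Claim_equal_pace := by
  intro station _
  unfold Spec_pace
  exact pace_spec' station
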